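-- pv_equiv track=rewrite | github.com/LoganKloft/aoc2024 | day_14/part2.py | largest_col_count
-- ===== SOURCE A (Python) =====
-- def largest_col_count(grid):
--     max_col_count = 0
--     for i in range(len(grid[0])):
--         col_count = 0
--         for j in range(len(grid)):
--             if (grid[j][i]) > 0:
--                 col_count += 1
--
--         if col_count > max_col_count:
--             max_col_count = col_count
--     return max_col_count
-- ===== SOURCE B (Python) =====
-- def largest_col_count(grid):
--     counts = [0] * len(grid[0])
--     for row in grid:
--         counts = [c + (1 if row[i] > 0 else 0) for i, c in enumerate(counts)]
--     return max(counts, default=0)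
-- ===== Notes on version B (the rewrite author's own statement) =====
-- stated objective: alternative
-- what changed: Replaces A's column-major nested rescans (for each column index, scan every row) by a single row-major pass that maintains a per-column tally list and takes its max at the end.
import Mathlib
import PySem

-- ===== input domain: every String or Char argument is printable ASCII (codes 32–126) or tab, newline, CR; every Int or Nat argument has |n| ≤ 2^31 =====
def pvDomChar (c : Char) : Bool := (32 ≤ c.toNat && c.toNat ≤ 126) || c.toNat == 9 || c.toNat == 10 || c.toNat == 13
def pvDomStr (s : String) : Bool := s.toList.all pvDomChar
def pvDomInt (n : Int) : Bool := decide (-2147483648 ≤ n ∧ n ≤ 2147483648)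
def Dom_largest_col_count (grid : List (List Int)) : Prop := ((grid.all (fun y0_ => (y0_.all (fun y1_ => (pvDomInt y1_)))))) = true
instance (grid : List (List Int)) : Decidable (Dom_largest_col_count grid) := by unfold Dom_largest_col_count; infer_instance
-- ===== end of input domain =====

-- B replaces A's column-major nested rescans by one row-major pass over a per-column tally list (alternative decomposition, same cost).

-- ===== PORT A =====
def largest_col_count (grid : List (List Int)) : Int :=
  let ncols : Int := ((PySem.List.pyGetD grid 0 []).length : Int)
  (PySem.List.pyRange 0 ncols 1).foldl (fun max_col_count i =>
    let col_count :=
      (PySem.List.pyRange 0 (grid.length : Int) 1).foldl (fun col_count j =>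
        if PySem.List.pyGetD (PySem.List.pyGetD grid j []) i 0 > 0 then col_count + 1 else col_count)
        (0 : Int)
    if col_count > max_col_count then col_count else max_col_count) 0

-- ===== PORT B =====
def largest_col_count_alt (grid : List (List Int)) : Int :=
  let ncols : Nat := (PySem.List.pyGetD grid 0 []).length
  let counts : List Int := grid.foldl (fun counts row =>
      (PySem.List.enumerate counts).map (fun ic =>
        ic.2 + (if PySem.List.pyGetD row ic.1 0 > 0 then (1 : Int) else 0)))
    (List.replicate ncols (0 : Int))
  (PySem.List.max? counts (fun x => x)).getD 0

-- ===== PRECONDITION & SPEC =====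
-- Pre_: the Python A raises IndexError on an empty grid (grid[0]) and whenever some row is shorter than row 0.
def Pre_largest_col_count (grid : List (List Int)) : Prop :=
  grid ≠ [] ∧ ∀ row ∈ grid, (grid.headD []).length ≤ row.length
instance (grid : List (List Int)) : Decidable (Pre_largest_col_count grid) := by unfold Pre_largest_col_count; infer_instance
def pvWitness_largest_col_count : List (List Int) := [[1, -2], [0, 3]]

def Spec_largest_col_count (grid : List (List Int)) (out : Int) : Prop := out = largest_col_count_alt grid
instance (grid : List (List Int)) (out : Int) : Decidable (Spec_largest_col_count grid out) := by unfold Spec_largest_col_count; infer_instance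

-- ===== CLAIM (what is proved, stated in full; the proofs are below) =====
def Claim_equal_largest_col_count : Prop := ∀ (grid : List (List Int)), Dom_largest_col_count grid → Pre_largest_col_count grid → Spec_largest_col_count grid (largest_col_count grid)

-- ===== LEMMAS AND PROOFS =====

-- the per-column count as a fold over the rows themselves
def pvColCnt (grid : List (List Int)) (i : Int) : Int :=
  grid.foldl (fun c row => if PySem.List.pyGetD row i 0 > 0 then c + 1 else c) 0

theorem pvColCnt_shift (grid : List (List Int)) (i : Int) (a : Int) :
    grid.foldl (fun c row => if PySem.List.pyGetD row i 0 > 0 then c + 1 else c) a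
      = a + pvColCnt grid i := by
  induction grid generalizing a with
  | nil => simp [pvColCnt]
  | cons r t ih =>
    simp only [pvColCnt, List.foldl_cons] at *
    rw [ih, ih ((if PySem.List.pyGetD r i 0 > 0 then (0:Int) + 1 else 0))]
    split <;> ring

theorem pvColCnt_cons (r : List Int) (t : List (List Int)) (i : Int) :
    pvColCnt (r :: t) i = (if PySem.List.pyGetD r i 0 > 0 then (1:Int) else 0) + pvColCnt t i := by
  rw [pvColCnt, List.foldl_cons, pvColCnt_shift]
  split <;> ring

theorem pvColCnt_nonneg (grid : List (List Int)) (i : Int) : 0 ≤ pvColCnt grid i := by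
  induction grid with
  | nil => simp [pvColCnt]
  | cons r t ih => rw [pvColCnt_cons]; split <;> omega

-- the inner fold of A is pvColCnt
theorem pvInnerA (grid : List (List Int)) (i : Int) :
    (PySem.List.pyRange 0 (grid.length : Int) 1).foldl (fun c j =>
        if PySem.List.pyGetD (PySem.List.pyGetD grid j []) i 0 > 0 then c + 1 else c) (0 : Int)
      = pvColCnt grid i := by
  exact PySem.List.foldl_pyRange_zero_pyGetD' grid []
    (fun c row => if PySem.List.pyGetD row i 0 > 0 then c + 1 else c) 0

-- B's counts list equals the map of pvColCnt over the column indices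
theorem pvCounts (grid : List (List Int)) (n : Nat) (g : Int → Int) :
    grid.foldl (fun counts row =>
        (PySem.List.enumerate counts).map (fun ic =>
          ic.2 + (if PySem.List.pyGetD row ic.1 0 > 0 then (1 : Int) else 0)))
      ((PySem.List.pyRange 0 (n : Int) 1).map g)
    = (PySem.List.pyRange 0 (n : Int) 1).map (fun i => g i + pvColCnt grid i) := by
  induction grid generalizing g with
  | nil => simp [pvColCnt]
  | cons r t ih =>
    simp only [List.foldl_cons]
    have hstep : (PySem.List.enumerate ((PySem.List.pyRange 0 (n : Int) 1).map g)).map (fun ic =>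
          ic.2 + (if PySem.List.pyGetD r ic.1 0 > 0 then (1 : Int) else 0))
        = (PySem.List.pyRange 0 (n : Int) 1).map
            (fun i => g i + (if PySem.List.pyGetD r i 0 > 0 then (1 : Int) else 0)) := by
      rw [PySem.List.enumerate_eq_map_pyRange (d := (0:Int))]
      simp only [PySem.List.len_eq, List.length_map, PySem.List.length_pyRange_one, sub_zero,
        Int.toNat_natCast, List.map_map]
      apply List.map_congr_left
      intro j hj
      have hj' := (PySem.List.mem_pyRange_one).1 hj
      simp only [Function.comp]
      rw [PySem.List.pyGetD_map_pyRange_of_nonneg g n j (0:Int) hj'.1 hj'.2]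
    rw [hstep, ih]
    apply List.map_congr_left
    intro j _
    rw [pvColCnt_cons]
    ring

-- running max fold = max fold
theorem pvMaxFold (F : Int → Int) (l : List Int) (m : Int) :
    l.foldl (fun mx i => if F i > mx then F i else mx) m = (l.map F).foldl max m := by
  induction l generalizing m with
  | nil => rfl
  | cons x t ih =>
    simp only [List.foldl_cons, List.map_cons]
    rw [ih]
    congr 1
    rcases lt_or_ge m (F x) with h | h
    · simp [le_of_lt h, h]
    · have : ¬ F x > m := not_lt.2 h
      simp [max_def, this]
      omega

-- ===== VERDICT (by name: the statement is the Claim_ definition above) =====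
theorem largest_col_count_spec : Claim_equal_largest_col_count := by
  intro grid _ _
  unfold Spec_largest_col_count largest_col_count largest_col_count_alt
  simp only []
  set n : Nat := (PySem.List.pyGetD grid 0 []).length with hn
  have hrep : (List.replicate n (0:Int)) = (PySem.List.pyRange 0 (n : Int) 1).map (fun _ => (0:Int)) := by
    rw [List.map_const']
    simp [PySem.List.length_pyRange_one]
  rw [hrep, pvCounts]
  have hcnts : (PySem.List.pyRange 0 (n : Int) 1).map (fun i => (0:Int) + pvColCnt grid i)
      = (PySem.List.pyRange 0 (n : Int) 1).map (pvColCnt grid) := by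
    apply List.map_congr_left; intro j _; ring
  rw [hcnts]
  simp only [pvInnerA]
  rw [pvMaxFold (pvColCnt grid)]
  -- now: (range.map F).foldl max 0 = (max? (range.map F) id).getD 0
  cases hr : (PySem.List.pyRange 0 (n : Int) 1).map (pvColCnt grid) with
  | nil => simp [PySem.List.max?]
  | cons x t =>
    rw [PySem.List.max?_id_cons]
    simp only [Option.getD_some, List.foldl_cons]
    have hx : 0 ≤ x := by
      have : x ∈ (PySem.List.pyRange 0 (n : Int) 1).map (pvColCnt grid) := by rw [hr]; simp
      obtain ⟨i, _, rfl⟩ := List.mem_map.1 this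
      exact pvColCnt_nonneg grid i
    have : max 0 x = x := max_eq_right hx
    rw [this]
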